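-- pv_equiv track=rewrite | github.com/wmetcalf/TheMissingLNK | damissinglnk.py | count_utf16le_strings
-- ===== SOURCE A (Python) =====
-- def count_utf16le_strings(data, min_len=4):
--     count = 0
--     run = 0
--     i = 0
--     n = len(data)
--     while i + 1 < n:
--         b0 = data[i]
--         b1 = data[i+1]
--         if 32 <= b0 <= 126 and b1 == 0:
--             run += 1
--         else:
--             if run >= min_len:
--                 count += 1
--             run = 0
--         i += 2
--     if run >= min_len:
--         count += 1
--     return count
-- ===== SOURCE B (Python) =====
-- def count_utf16le_strings(data, min_len=4):
--     # Pass 1: validity flag for each even-offset byte pair.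
--     flags = []
--     i = 0
--     while i + 1 < len(data):
--         flags.append(32 <= data[i] <= 126 and data[i + 1] == 0)
--         i += 2
--     # Pass 2: group equal flags and count True-groups of sufficient length.
--     count = 0
--     j = 0
--     m = len(flags)
--     while j < m:
--         k = j
--         while k < m and flags[k] == flags[j]:
--             k += 1
--         if flags[j] and k - j >= min_len:
--             count += 1
--         j = k
--     return count
-- ===== Notes on version B (the rewrite author's own statement) =====
-- stated objective: alternative
-- what changed: Replaces A's single-pass run/reset state machine over raw bytes by a two-phase decomposition: precompute a boolean validity flag per even-offset pair, then a grouping pass that counts maximal True-groups of length >= min_len.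
-- outside the precondition, e.g. on count_utf16le_strings([0, 0], 0): A returns 2, B returns 0; on count_utf16le_strings([65, 0], -1): A returns 1, B returns 1
import Mathlib
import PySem

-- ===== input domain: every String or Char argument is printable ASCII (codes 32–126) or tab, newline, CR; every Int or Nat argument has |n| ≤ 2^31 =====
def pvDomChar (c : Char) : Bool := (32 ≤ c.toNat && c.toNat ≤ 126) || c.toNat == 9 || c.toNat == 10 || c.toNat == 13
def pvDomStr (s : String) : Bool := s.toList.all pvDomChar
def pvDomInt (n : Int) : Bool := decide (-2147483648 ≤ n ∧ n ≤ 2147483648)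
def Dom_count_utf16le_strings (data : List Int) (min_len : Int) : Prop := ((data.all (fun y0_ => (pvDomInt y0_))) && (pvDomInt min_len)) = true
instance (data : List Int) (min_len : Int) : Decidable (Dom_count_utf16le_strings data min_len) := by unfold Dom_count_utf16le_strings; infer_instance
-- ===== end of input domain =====

-- B replaces A's inline run/reset state machine by a two-phase decomposition
-- (per-pair validity flags, then a grouping pass); same cost, alternative structure.

-- ===== PORT A =====
-- A's while loop over even offsets, carrying (count, run); a trailing odd byte is ignored.
def pvALoop (min_len : Int) : List Int → Int → Int → Int
  | b0 :: b1 :: rest, count, run =>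
      if 32 ≤ b0 ∧ b0 ≤ 126 ∧ b1 = 0 then
        pvALoop min_len rest count (run + 1)
      else
        pvALoop min_len rest (if run ≥ min_len then count + 1 else count) 0
  | [_], count, run => if run ≥ min_len then count + 1 else count
  | [], count, run => if run ≥ min_len then count + 1 else count

def count_utf16le_strings (data : List Int) (min_len : Int) : Int :=
  pvALoop min_len data 0 0

-- ===== PORT B =====
-- B's pass 1: the validity flag of each even-offset pair.
def pvBFlags : List Int → List Bool
  | b0 :: b1 :: rest => (decide (32 ≤ b0 ∧ b0 ≤ 126 ∧ b1 = 0)) :: pvBFlags rest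
  | [_] => []
  | [] => []

-- B's pass 2: the inner 'while k < m and flags[k] == flags[j]' is take/dropWhile of equal flags.
def pvBGroup (min_len : Int) : List Bool → Int
  | [] => 0
  | f :: rest =>
      (if f && decide ((1 + ((rest.takeWhile (· == f)).length : Int)) ≥ min_len) then 1 else 0)
        + pvBGroup min_len (rest.dropWhile (· == f))
  termination_by fs => fs.length
  decreasing_by
    simp only [List.length_cons]
    exact Nat.lt_succ_of_le (List.length_dropWhile_le _ _)

def count_utf16le_strings_alt (data : List Int) (min_len : Int) : Int :=
  pvBGroup min_len (pvBFlags data)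

-- ===== PRECONDITION & SPEC =====
-- Pre_ excludes min_len ≤ 0, a degenerate threshold on which every run — including the
-- empty run at each reset and at the end — meets the minimum, so the count is unspecified:
-- A returns (#invalid pairs + 1) there while B counts the actual valid-pair groups.
def Pre_count_utf16le_strings (data : List Int) (min_len : Int) : Prop := 1 ≤ min_len
instance (data : List Int) (min_len : Int) : Decidable (Pre_count_utf16le_strings data min_len) := by
  unfold Pre_count_utf16le_strings; infer_instance

def pvWitness_count_utf16le_strings : List Int × Int := ([72, 0, 105, 0, 33, 0, 46, 0, 255, 7], 4)

def Spec_count_utf16le_strings (data : List Int) (min_len : Int) (out : Int) : Prop := out = count_utf16le_strings_alt data min_len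
instance (data : List Int) (min_len : Int) (out : Int) : Decidable (Spec_count_utf16le_strings data min_len out) := by unfold Spec_count_utf16le_strings; infer_instance

-- ===== CLAIM (what is proved, stated in full; the proofs are below) =====
def Claim_equal_count_utf16le_strings : Prop := ∀ (data : List Int) (min_len : Int), Dom_count_utf16le_strings data min_len → Pre_count_utf16le_strings data min_len → Spec_count_utf16le_strings data min_len (count_utf16le_strings data min_len)

-- ===== LEMMAS AND PROOFS =====

-- A's state machine lifted to the flag level (proof-only helper).
def pvFLoop (m : Int) : List Bool → Int → Int → Int
  | [], count, run => if run ≥ m then count + 1 else count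
  | true :: fs, count, run => pvFLoop m fs count (run + 1)
  | false :: fs, count, run => pvFLoop m fs (if run ≥ m then count + 1 else count) 0

-- A's byte-level loop equals the flag-level loop on B's flags.
theorem pvALoop_eq_fLoop (m : Int) :
    ∀ (data : List Int) (count run : Int),
      pvALoop m data count run = pvFLoop m (pvBFlags data) count run := by
  intro data
  induction data using pvBFlags.induct with
  | case1 b0 b1 rest ih =>
      intro count run
      by_cases h : 32 ≤ b0 ∧ b0 ≤ 126 ∧ b1 = 0 <;>
        simp [pvALoop, pvBFlags, pvFLoop, h, ih]
  | case2 b => intro count run; simp only [pvALoop, pvBFlags, pvFLoop]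
  | case3 => intro count run; simp only [pvALoop, pvBFlags, pvFLoop]

-- The accumulated count adds up.
theorem pvFLoop_shift (m : Int) :
    ∀ (fs : List Bool) (count run : Int),
      pvFLoop m fs count run = count + pvFLoop m fs 0 run := by
  intro fs
  induction fs with
  | nil => intro count run; simp only [pvFLoop]; split <;> ring
  | cons f fs ih =>
      intro count run
      cases f with
      | true => simp only [pvFLoop]; rw [ih, ih 0]
      | false =>
          simp only [pvFLoop]
          rw [ih, ih (if run ≥ m then 0 + 1 else 0)]
          split <;> ring

-- pvBGroup ignores leading false flags.
theorem pvBGroup_dropFalse (m : Int) :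
    ∀ (fs : List Bool), pvBGroup m (fs.dropWhile (· == false)) = pvBGroup m fs := by
  intro fs
  match fs with
  | [] => rfl
  | true :: rest => rfl
  | false :: rest =>
      conv_rhs => rw [pvBGroup]
      simp

theorem pvBGroup_false_cons (m : Int) (fs : List Bool) :
    pvBGroup m (false :: fs) = pvBGroup m fs := by
  rw [pvBGroup]
  simp only [Bool.false_and, Bool.false_eq_true, if_false, zero_add, List.dropWhile_cons]
  exact pvBGroup_dropFalse m fs

-- Unfolding pvBGroup along a leading block of true flags.
theorem pvBGroup_dropTrue (m : Int) (hm : 1 ≤ m) :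
    ∀ (fs : List Bool),
      pvBGroup m fs =
        (if m ≤ ((fs.takeWhile (· == true)).length : Int) then 1 else 0)
          + pvBGroup m (fs.dropWhile (· == true)) := by
  intro fs
  match fs with
  | [] => simp only [List.takeWhile_nil, List.dropWhile_nil, List.length_nil]; rw [pvBGroup]; split <;> omega
  | false :: rest =>
      simp only [List.takeWhile_cons, List.dropWhile_cons]
      norm_num
      omega
  | true :: rest =>
      rw [pvBGroup]
      simp only [List.takeWhile_cons, List.dropWhile_cons, beq_self_eq_true, if_true,
        Bool.true_and, decide_eq_true_eq, ge_iff_le, List.length_cons]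
      congr 1
      split_ifs with h1 h2 h2 <;> push_cast at * <;> omega

-- Main invariant: the flag-level loop with a pending run of length run counts one
-- group iff run plus the leading true-block reaches m, then proceeds on the rest.
theorem pvFLoop_eq_group (m : Int) (hm : 1 ≤ m) :
    ∀ (fs : List Bool) (run : Int), 0 ≤ run →
      pvFLoop m fs 0 run =
        (if m ≤ run + ((fs.takeWhile (· == true)).length : Int) then 1 else 0)
          + pvBGroup m (fs.dropWhile (· == true)) := by
  intro fs
  induction fs with
  | nil =>
      intro run _
      simp only [pvFLoop, List.takeWhile_nil, List.dropWhile_nil, List.length_nil]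
      rw [pvBGroup]
      split_ifs <;> omega
  | cons f fs ih =>
      intro run hrun
      cases f with
      | true =>
          simp only [pvFLoop, List.takeWhile_cons, List.dropWhile_cons, beq_self_eq_true,
            if_true, List.length_cons]
          rw [ih (run + 1) (by omega)]
          congr 2
          congr 1
          push_cast
          ring
      | false =>
          simp only [pvFLoop, List.takeWhile_cons, List.dropWhile_cons]
          norm_num
          rw [pvFLoop_shift, ih 0 le_rfl]
          simp only [zero_add]
          rw [← pvBGroup_dropTrue m hm fs, pvBGroup_false_cons]

-- ===== VERDICT (by name: the statement is the Claim_ definition above) =====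
theorem count_utf16le_strings_spec : Claim_equal_count_utf16le_strings := by
  intro data min_len _ hpre
  unfold Spec_count_utf16le_strings count_utf16le_strings count_utf16le_strings_alt
  rw [pvALoop_eq_fLoop, pvFLoop_eq_group min_len hpre (pvBFlags data) 0 le_rfl, zero_add,
    ← pvBGroup_dropTrue min_len hpre]
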